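-- pv_equiv track=rewrite | github.com/cooki-chan/advent-of-code | day19/part2.py | replacements
-- ===== SOURCE A (Python) =====
-- def replacements(design, rep):
--     splits = design.split(rep)
--
--     reps = [splits.pop(0)]
--
--     for i in splits:
--         newR = []
--         for r in reps:
--             newR.append(r + rep + i)
--             newR.append(r + "." + i)
--         reps = newR
--
--     return reps
-- ===== SOURCE B (Python) =====
-- from itertools import product
--
--
-- def replacements(design, rep):
--     parts = design.split(rep)
--     out = []
--     for seps in product([rep, "."], repeat=len(parts) - 1):
--         s = parts[0]
--         for sep, part in zip(seps, parts[1:]):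
--             s += sep + part
--         out.append(s)
--     return out
-- ===== Notes on version B (the rewrite author's own statement) =====
-- stated objective: alternative
-- what changed: A grows the result by repeatedly doubling an accumulator list (for each new split part, two extensions of every partial string); B splits once and makes a single pass over the itertools.product of separator choices for the gaps, building each output string directly.
import Mathlib
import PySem

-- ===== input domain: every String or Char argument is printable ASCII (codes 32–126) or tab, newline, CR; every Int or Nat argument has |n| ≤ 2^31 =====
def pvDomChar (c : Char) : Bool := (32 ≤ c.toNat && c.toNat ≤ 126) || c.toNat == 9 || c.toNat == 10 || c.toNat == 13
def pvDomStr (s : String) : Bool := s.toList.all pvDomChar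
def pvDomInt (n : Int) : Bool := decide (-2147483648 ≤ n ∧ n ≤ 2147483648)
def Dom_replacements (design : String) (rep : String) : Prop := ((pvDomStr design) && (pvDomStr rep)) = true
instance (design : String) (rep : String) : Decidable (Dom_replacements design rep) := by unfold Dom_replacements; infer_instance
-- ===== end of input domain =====

-- B replaces A's list-doubling accumulator loop with a single pass over the
-- itertools-style product of separator choices for the gaps (objective: alternative).

-- ===== PORT A =====
def replacements (design : String) (rep : String) : List String :=
  match PySem.Str.split? design rep with
  | none => []          -- rep = "": Python raises ValueError, excluded by Pre_
  | some splits =>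
    match PySem.List.pop? splits 0 with
    | none => []        -- unreachable: str.split never returns an empty list
    | some (first, rest) =>
      rest.foldl (fun reps i =>
        reps.foldl (fun newR r => (newR ++ [r ++ rep ++ i]) ++ [r ++ "." ++ i]) []) [first]

-- ===== PORT B =====
-- itertools.product([rep, "."], repeat = n), in product order (first slot slowest)
def pvProd (rep : String) : Nat → List (List String)
  | 0 => [[]]
  | n + 1 => [rep, "."].flatMap (fun c => (pvProd rep n).map (fun t => c :: t))

def replacements_alt (design : String) (rep : String) : List String :=
  match PySem.Str.split? design rep with
  | none => []          -- rep = "": split raises, excluded by Pre_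
  | some parts =>
    match parts with
    | [] => []          -- unreachable: str.split never returns an empty list
    | p0 :: rest =>
      (pvProd rep rest.length).map (fun seps =>
        (seps.zip rest).foldl (fun s sp => s ++ sp.1 ++ sp.2) p0)

-- ===== PRECONDITION & SPEC =====
-- Pre_ excludes only rep = "", on which Python's str.split raises ValueError.
def Pre_replacements (design : String) (rep : String) : Prop := rep ≠ ""
instance (design : String) (rep : String) : Decidable (Pre_replacements design rep) := by
  unfold Pre_replacements; infer_instance

def pvWitness_replacements : String × String := ("abcbd", "b")

def Spec_replacements (design : String) (rep : String) (out : List String) : Prop := out = replacements_alt design rep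
instance (design : String) (rep : String) (out : List String) : Decidable (Spec_replacements design rep out) := by unfold Spec_replacements; infer_instance

-- ===== CLAIM (what is proved, stated in full; the proofs are below) =====
def Claim_equal_replacements : Prop := ∀ (design : String) (rep : String), Dom_replacements design rep → Pre_replacements design rep → Spec_replacements design rep (replacements design rep)

-- ===== LEMMAS AND PROOFS =====

-- A's inner loop (append two strings per existing result) is a flatMap
lemma inner_loop (f g : String → String) (reps : List String) (acc : List String) :
    reps.foldl (fun newR r => (newR ++ [f r]) ++ [g r]) acc
      = acc ++ reps.flatMap (fun r => [f r, g r]) := by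
  induction reps generalizing acc with
  | nil => simp
  | cons r rs _ => simp [List.flatMap, List.append_assoc]

-- A's outer loop equals B's product-driven pass, for any accumulator
lemma key (rep : String) (l : List String) (reps : List String) :
    l.foldl (fun reps i =>
        reps.foldl (fun newR r => (newR ++ [r ++ rep ++ i]) ++ [r ++ "." ++ i]) []) reps
      = reps.flatMap (fun r =>
          (pvProd rep l.length).map (fun seps =>
            (seps.zip l).foldl (fun s sp => s ++ sp.1 ++ sp.2) r)) := by
  induction l generalizing reps with
  | nil => simp [pvProd]
  | cons i l ih =>
    rw [List.foldl_cons, ih]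
    have h1 : List.foldl (fun newR r => (newR ++ [r ++ rep ++ i]) ++ [r ++ "." ++ i]) [] reps
        = reps.flatMap (fun r => [r ++ rep ++ i, r ++ "." ++ i]) := by
      simpa using inner_loop (fun r => r ++ rep ++ i) (fun r => r ++ "." ++ i) reps []
    show List.flatMap _ (List.foldl _ [] reps) = _
    rw [h1, List.flatMap_assoc]
    congr 1
    funext r
    simp [pvProd, List.flatMap_cons, List.map_map, Function.comp_def, List.zip_cons_cons]

theorem replacements_spec_aux (design rep : String) (hpre : rep ≠ "") :
    replacements design rep = replacements_alt design rep := by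
  unfold replacements replacements_alt
  cases hs : PySem.Str.split? design rep with
  | none =>
    exact absurd (by simpa [PySem.Str.split?, PySem.Chars.split?] using hs) hpre
  | some parts =>
    cases parts with
    | nil => rfl
    | cons p0 rest =>
      simp only [PySem.List.pop?_zero_cons]
      have := key rep rest [p0]
      simpa using this

-- ===== VERDICT (by name: the statement is the Claim_ definition above) =====
theorem replacements_spec : Claim_equal_replacements := by
  intro design rep _ hpre
  unfold Spec_replacements
  exact replacements_spec_aux design rep hpre
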